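-- pv_equiv track=rewrite | github.com/Vlad-Shcherbina/Morph-Endo-Legacy | src/dna_basics.py | protect
-- ===== SOURCE A (Python) =====
-- def protect(dna, level):
--     assert level >= 0
--     m = {'I': 'C', 'C': 'F', 'F': 'P', 'P': 'IC'}
--     a = ['I']
--     for i in range(level+3):
--         a.append(''.join(map(m.get, a[-1])))
--
--     m = dict(zip('ICFP', a[-4:]))
--     return ''.join(map(m.get, dna))
-- ===== SOURCE B (Python) =====
-- def protect(dna, level):
--     assert level >= 0
--     m = {'I': 'C', 'C': 'F', 'F': 'P', 'P': 'IC'}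
--     s = dna
--     for _ in range(level):
--         s = ''.join(m[x] for x in s)
--     return s
-- ===== Notes on version B (the rewrite author's own statement) =====
-- stated objective: simpler
-- what changed: B drops A's precomputed chain a and the four-entry level table built from its last four elements, and instead applies the one-step substitution map to the whole string `level` times.
-- crash fix: On dna containing a character outside 'ICFP' at level 0, A raises TypeError (m.get yields None inside ''.join) while B returns dna unchanged, the identity protection. — e.g. on protect("GACT", 0): A raises TypeError, B returns "GACT"
import Mathlib
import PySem

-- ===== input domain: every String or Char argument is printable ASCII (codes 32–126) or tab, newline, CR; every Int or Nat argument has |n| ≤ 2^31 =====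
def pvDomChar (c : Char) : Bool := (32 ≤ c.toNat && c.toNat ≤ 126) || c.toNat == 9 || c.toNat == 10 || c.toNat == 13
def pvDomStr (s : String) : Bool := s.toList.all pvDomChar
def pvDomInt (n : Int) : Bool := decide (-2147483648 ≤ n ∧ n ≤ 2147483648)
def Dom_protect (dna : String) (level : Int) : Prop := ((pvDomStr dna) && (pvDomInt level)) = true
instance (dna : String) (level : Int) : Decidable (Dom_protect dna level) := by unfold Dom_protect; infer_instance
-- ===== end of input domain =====

-- B replaces A's precomputed four-entry expansion table with `level` whole-string expansion passes (objective: simpler).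

-- ===== PORT A =====
-- the substitution map m = {'I':'C','C':'F','F':'P','P':'IC'} (used by both Pythons)
def pvM : PySem.Dict Char String :=
  PySem.Dict.mk [('I', "C"), ('C', "F"), ('F', "P"), ('P', "IC")]

-- ''.join(map(m.get, s)); a key missing from m gives None and ''.join raises TypeError — such inputs are excluded by Pre_
def pvGetJoin (m : PySem.Dict Char String) (s : String) : String :=
  PySem.Str.join "" (s.toList.map (fun c => (PySem.Dict.get? m c).getD ""))

def protect (dna : String) (level : Int) : String :=
  -- assert level >= 0: AssertionError on negative level — excluded by Pre_
  let a := (PySem.List.pyRange 0 (level + 3) 1).foldl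
      (fun a _ => a ++ [pvGetJoin pvM ((PySem.List.pyGet? a (-1)).getD "")]) ["I"]
  let m2 : PySem.Dict Char String :=
      PySem.Dict.mk (List.zip "ICFP".toList (PySem.List.slice a (some (-4)) none))
  pvGetJoin m2 dna

-- ===== PORT B =====
def protect_alt (dna : String) (level : Int) : String :=
  -- assert level >= 0 — excluded by Pre_; ''.join(m[x] for x in s): KeyError on a non-ICFP char — excluded by Pre_
  (PySem.List.pyRange 0 level 1).foldl
    (fun s _ => PySem.Str.join "" (s.toList.map (fun c => (PySem.Dict.get? pvM c).getD ""))) dna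

-- ===== PRECONDITION & SPEC =====
-- Pre_ excludes negative level (A's assert fails, AssertionError) and dna containing a character
-- outside 'ICFP' (m.get yields None there and ''.join raises TypeError).
def Pre_protect (dna : String) (level : Int) : Prop :=
  0 ≤ level ∧ dna.toList.all (fun c => c == 'I' || c == 'C' || c == 'F' || c == 'P') = true
instance (dna : String) (level : Int) : Decidable (Pre_protect dna level) := by
  unfold Pre_protect; infer_instance

def pvWitness_protect : String × Int := ("ICFP", 2)

-- At level 0 with a character outside 'ICFP' A raises TypeError while B returns dna unchanged
-- (protection at level 0 is the identity).
def Raises_protect (dna : String) (level : Int) : Prop :=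
  level = 0 ∧ ¬ (dna.toList.all (fun c => c == 'I' || c == 'C' || c == 'F' || c == 'P') = true)
instance (dna : String) (level : Int) : Decidable (Raises_protect dna level) := by
  unfold Raises_protect; infer_instance
def pvRaiseWitness_protect : String × Int := ("GACT", 0)
def pvRaiseWitnessOut_protect : String := "GACT"

def Spec_protect (dna : String) (level : Int) (out : String) : Prop := out = protect_alt dna level
instance (dna : String) (level : Int) (out : String) : Decidable (Spec_protect dna level out) := by
  unfold Spec_protect; infer_instance

-- ===== CLAIM (what is proved, stated in full; the proofs are below) =====
def Claim_equal_protect : Prop := ∀ (dna : String) (level : Int), Dom_protect dna level →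
  Pre_protect dna level → Spec_protect dna level (protect dna level)

def Claim_raises_protect : Prop :=
  (∀ (dna : String) (level : Int), Dom_protect dna level → Raises_protect dna level → ¬ Pre_protect dna level) ∧
  (Dom_protect (pvRaiseWitness_protect.1) (pvRaiseWitness_protect.2) ∧
   Raises_protect (pvRaiseWitness_protect.1) (pvRaiseWitness_protect.2) ∧
   protect_alt (pvRaiseWitness_protect.1) (pvRaiseWitness_protect.2) = pvRaiseWitnessOut_protect)

-- ===== LEMMAS AND PROOFS =====

-- one-character expansion and one whole-pass expansion, on the List Char side
def pvG (c : Char) : List Char := ((PySem.Dict.get? pvM c).getD "").toList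
def pvE (l : List Char) : List Char := l.flatMap pvG
-- one pass on the String side (this is exactly B's loop body and A's ''.join(map(m.get, ·)))
def pvEA (s : String) : String := pvGetJoin pvM s
-- the i-th element of A's growing list a
def pvS (i : Nat) : String := pvEA^[i] "I"

theorem pv_join_empty_flatten (ls : List (List Char)) : PySem.Chars.join [] ls = ls.flatten := by
  induction ls with
  | nil => exact PySem.Chars.join_nil []
  | cons p t ih =>
    cases t with
    | nil => simp [PySem.Chars.join_singleton]
    | cons q r => rw [PySem.Chars.join_cons_cons]; simp [ih]

theorem pvGetJoin_toList (m : PySem.Dict Char String) (s : String) :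
    (pvGetJoin m s).toList = s.toList.flatMap (fun c => ((PySem.Dict.get? m c).getD "").toList) := by
  simp [pvGetJoin, PySem.Str.toList_join, pv_join_empty_flatten, List.map_map,
    List.flatMap_def, Function.comp_def]

theorem pvEA_iter_toList (n : Nat) (s : String) :
    (pvEA^[n] s).toList = pvE^[n] s.toList := by
  induction n generalizing s with
  | zero => simp
  | succ k ih =>
    rw [Function.iterate_succ_apply', Function.iterate_succ_apply']
    rw [pvEA, pvGetJoin_toList, ih]
    rfl

theorem pvE_iter_append (n : Nat) (a b : List Char) :
    pvE^[n] (a ++ b) = pvE^[n] a ++ pvE^[n] b := by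
  induction n generalizing a b with
  | zero => simp
  | succ k ih =>
    rw [Function.iterate_succ_apply, Function.iterate_succ_apply, Function.iterate_succ_apply]
    rw [show pvE (a ++ b) = pvE a ++ pvE b from List.flatMap_append, ih]

theorem pvE_iter_nil (n : Nat) : pvE^[n] [] = [] := by
  induction n with
  | zero => rfl
  | succ k ih => rw [Function.iterate_succ_apply]; exact ih

theorem pvE_iter_flat (n : Nat) (l : List Char) :
    pvE^[n] l = l.flatMap (fun c => pvE^[n] [c]) := by
  induction l with
  | nil => simp [pvE_iter_nil]
  | cons c t ih =>
    have : (c :: t) = [c] ++ t := rfl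
    rw [this, pvE_iter_append, ih]
    simp

-- A's loop body on the a-list
def pvStepA (a : List String) : List String :=
  a ++ [pvGetJoin pvM ((PySem.List.pyGet? a (-1)).getD "")]

theorem pvStepA_iter (k : Nat) :
    pvStepA^[k] ["I"] = (List.range (k + 1)).map pvS := by
  induction k with
  | zero => simp [pvS]
  | succ j ih =>
    rw [Function.iterate_succ_apply', ih]
    have h1 : (List.range (j + 1)).map pvS = (List.range j).map pvS ++ [pvS j] := by
      rw [List.range_succ, List.map_append]; rfl
    have h2 : (List.range (j + 1 + 1)).map pvS
        = ((List.range j).map pvS ++ [pvS j]) ++ [pvS (j + 1)] := by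
      rw [List.range_succ, List.map_append, List.range_succ, List.map_append]; rfl
    rw [pvStepA, h1, PySem.List.pyGet?_neg_one_append_singleton, h2]
    simp [pvS, Function.iterate_succ_apply', pvEA]

theorem pv_protect_eq (dna : String) (n : Nat) :
    protect dna (n : Int) =
      pvGetJoin (PySem.Dict.mk [('I', pvS n), ('C', pvS (n + 1)), ('F', pvS (n + 2)), ('P', pvS (n + 3))]) dna := by
  rw [protect]
  have hfold : (PySem.List.pyRange 0 ((n : Int) + 3) 1).foldl
      (fun a _ => a ++ [pvGetJoin pvM ((PySem.List.pyGet? a (-1)).getD "")]) ["I"]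
      = pvStepA^[n + 3] ["I"] := by
    rw [show (fun (a : List String) (_ : Int) => a ++ [pvGetJoin pvM ((PySem.List.pyGet? a (-1)).getD "")])
        = (fun a _ => pvStepA a) from rfl]
    rw [List.foldl_const]
    congr 1
    rw [PySem.List.length_pyRange_one]
    omega
  rw [hfold, pvStepA_iter]
  have hlen : ((List.range (n + 3 + 1)).map pvS).length = n + 4 := by simp
  have hslice : PySem.List.slice ((List.range (n + 3 + 1)).map pvS) (some (-4)) none
      = [pvS n, pvS (n + 1), pvS (n + 2), pvS (n + 3)] := by
    rw [PySem.List.slice_from_neg_ofNat _ 4 (by omega), hlen]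
    have : List.range (n + 3 + 1) = List.range n ++ [n, n + 1, n + 2, n + 3] := by
      rw [List.range_succ, List.range_succ, List.range_succ, List.range_succ]
      simp
    rw [this, List.map_append]
    rw [show n + 4 - 4 = ((List.range n).map pvS).length by simp]
    rw [List.drop_left]
    rfl
  rw [hslice]
  rfl

theorem pv_protect_alt_eq (dna : String) (n : Nat) :
    protect_alt dna (n : Int) = pvEA^[n] dna := by
  rw [protect_alt]
  rw [show (fun (s : String) (_ : Int) =>
      PySem.Str.join "" (s.toList.map (fun c => (PySem.Dict.get? pvM c).getD "")))
      = (fun s _ => pvEA s) from rfl]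
  rw [List.foldl_const]
  congr 1
  rw [PySem.List.length_pyRange_one]
  omega

theorem pv_table_char (n : Nat) (c : Char)
    (hc : c = 'I' ∨ c = 'C' ∨ c = 'F' ∨ c = 'P') :
    ((PySem.Dict.get? (PySem.Dict.mk [('I', pvS n), ('C', pvS (n + 1)), ('F', pvS (n + 2)), ('P', pvS (n + 3))]) c).getD "").toList
      = pvE^[n] [c] := by
  have hS : ∀ i : Nat, (pvS i).toList = pvE^[i] ['I'] := fun i => pvEA_iter_toList i "I"
  rcases hc with h | h | h | h <;> subst h
  · simpa [PySem.Dict.get?] using hS n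
  · rw [show (PySem.Dict.get? (PySem.Dict.mk [('I', pvS n), ('C', pvS (n+1)), ('F', pvS (n+2)), ('P', pvS (n+3))]) 'C').getD "" = pvS (n+1) from rfl]
    rw [hS, Function.iterate_add_apply]
    rw [show pvE^[1] ['I'] = ['C'] by decide]
  · rw [show (PySem.Dict.get? (PySem.Dict.mk [('I', pvS n), ('C', pvS (n+1)), ('F', pvS (n+2)), ('P', pvS (n+3))]) 'F').getD "" = pvS (n+2) from rfl]
    rw [hS, Function.iterate_add_apply]
    rw [show pvE^[2] ['I'] = ['F'] by decide]
  · rw [show (PySem.Dict.get? (PySem.Dict.mk [('I', pvS n), ('C', pvS (n+1)), ('F', pvS (n+2)), ('P', pvS (n+3))]) 'P').getD "" = pvS (n+3) from rfl]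
    rw [hS, Function.iterate_add_apply]
    rw [show pvE^[3] ['I'] = ['P'] by decide]

-- ===== VERDICT (by name: the statement is the Claim_ definition above) =====
theorem protect_spec : Claim_equal_protect := by
  intro dna level _ hpre
  obtain ⟨hlv, hchars⟩ := hpre
  obtain ⟨n, rfl⟩ : ∃ n : Nat, level = (n : Int) := ⟨level.toNat, (Int.toNat_of_nonneg hlv).symm⟩
  unfold Spec_protect
  rw [pv_protect_eq, pv_protect_alt_eq]
  apply String.toList_inj.mp
  rw [pvEA_iter_toList, pvGetJoin_toList, pvE_iter_flat]
  apply List.flatMap_congr  -- congruence on members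
  intro c hc
  have h := List.all_eq_true.mp hchars c hc
  simp only [Bool.or_eq_true, beq_iff_eq] at h
  exact pv_table_char n c (by tauto)


@[simp] theorem protect_raises : Claim_raises_protect := by
  unfold Claim_raises_protect
  refine ⟨?_, by decide, by decide, ?_⟩
  · rintro dna level _ ⟨hl, hbad⟩ ⟨_, hall⟩
    exact hbad hall
  · rw [show pvRaiseWitness_protect.2 = ((0 : Nat) : Int) from rfl, pv_protect_alt_eq]
    rfl
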